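-- pv_equiv track=rewrite | github.com/chiragpatel1229/Cryptographic-RBGs-Development-and-Analysis | Other_All_Files/JSON_File_Analysis.py | calculate_gap_structure
-- ===== SOURCE A (Python) =====
-- def calculate_gap_structure(sequence):
--     gap_lengths = []
--     current_gap_length = 0
--
--     for bit in sequence:
--         if bit == 0:
--             current_gap_length += 1
--         elif current_gap_length > 0:
--             gap_lengths.append(current_gap_length)
--             current_gap_length = 0
--
--     return gap_lengths
-- ===== SOURCE B (Python) =====
-- def calculate_gap_structure(sequence):
--     nz = [-1] + [i for i, b in enumerate(sequence) if b != 0]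
--     return [b - a - 1 for a, b in zip(nz, nz[1:]) if b - a - 1 > 0]
-- ===== Notes on version B (the rewrite author's own statement) =====
-- stated objective: alternative
-- what changed: Replaces the stateful run-length accumulator loop by first collecting the indices of nonzero elements (with a -1 sentinel) and then emitting the positive pairwise index differences minus one.
import Mathlib
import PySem

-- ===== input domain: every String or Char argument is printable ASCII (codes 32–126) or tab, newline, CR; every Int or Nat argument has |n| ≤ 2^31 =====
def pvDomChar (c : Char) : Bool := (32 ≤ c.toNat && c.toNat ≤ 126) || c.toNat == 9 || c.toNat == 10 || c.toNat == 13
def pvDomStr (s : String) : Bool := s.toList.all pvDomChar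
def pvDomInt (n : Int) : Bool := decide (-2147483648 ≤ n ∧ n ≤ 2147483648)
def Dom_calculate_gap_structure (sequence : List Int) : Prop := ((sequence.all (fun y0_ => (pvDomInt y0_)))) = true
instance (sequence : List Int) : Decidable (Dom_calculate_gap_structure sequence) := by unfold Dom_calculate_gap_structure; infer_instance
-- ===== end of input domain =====

-- B replaces A's stateful run-length accumulator loop by collecting the nonzero
-- indices once and emitting positive pairwise differences minus one (alternative
-- decomposition, same O(n) cost).

-- ===== PORT A =====
def calculate_gap_structure (sequence : List Int) : List Int :=
  (sequence.foldl
    (fun (st : List Int × Int) bit =>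
      if bit == 0 then (st.1, st.2 + 1)
      else if st.2 > 0 then (st.1 ++ [st.2], 0)
      else st)
    ([], 0)).1

-- ===== PORT B =====
def calculate_gap_structure_alt (sequence : List Int) : List Int :=
  let nz : List Int :=
    -1 :: ((PySem.List.enumerate sequence 0).filter (fun p => p.2 != 0)).map (fun p => p.1)
  ((nz.zip nz.tail).filter (fun p => p.2 - p.1 - 1 > 0)).map (fun p => p.2 - p.1 - 1)

-- ===== PRECONDITION & SPEC =====
def Spec_calculate_gap_structure (sequence : List Int) (out : List Int) : Prop := out = calculate_gap_structure_alt sequence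
instance (sequence : List Int) (out : List Int) : Decidable (Spec_calculate_gap_structure sequence out) := by unfold Spec_calculate_gap_structure; infer_instance

-- ===== CLAIM (what is proved, stated in full; the proofs are below) =====
def Claim_equal_calculate_gap_structure : Prop := ∀ (sequence : List Int), Dom_calculate_gap_structure sequence → Spec_calculate_gap_structure sequence (calculate_gap_structure sequence)

-- ===== LEMMAS AND PROOFS =====

-- common recursive specification: gap list of `s` given a run of `c` zeros already seen
def pvG (c : Int) : List Int → List Int
  | [] => []
  | bit :: t => if bit == 0 then pvG (c + 1) t else if c > 0 then c :: pvG 0 t else pvG c t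

-- B's second pass, abstracted over the index list
def pvPairs (l : List Int) : List Int :=
  ((l.zip l.tail).filter (fun p => p.2 - p.1 - 1 > 0)).map (fun p => p.2 - p.1 - 1)

theorem pvFoldA (s : List Int) : ∀ (gaps : List Int) (c : Int),
    (s.foldl
      (fun (st : List Int × Int) bit =>
        if bit == 0 then (st.1, st.2 + 1)
        else if st.2 > 0 then (st.1 ++ [st.2], 0)
        else st)
      (gaps, c)).1 = gaps ++ pvG c s := by
  induction s with
  | nil => intro gaps c; simp [pvG]
  | cons bit t ih =>
    intro gaps c
    rw [List.foldl_cons]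
    by_cases hb : bit = 0
    · have hf : (if bit == 0 then (gaps, c + 1) else if c > 0 then (gaps ++ [c], (0:Int)) else (gaps, c)) = (gaps, c + 1) := by simp [hb]
      rw [hf, ih gaps (c + 1)]
      simp [pvG, hb]
    · by_cases hc : c > 0
      · have hf : (if bit == 0 then (gaps, c + 1) else if c > 0 then (gaps ++ [c], (0:Int)) else (gaps, c)) = (gaps ++ [c], 0) := by simp [hb, hc]
        rw [hf, ih (gaps ++ [c]) 0]
        simp [pvG, hb, hc]
      · have hf : (if bit == 0 then (gaps, c + 1) else if c > 0 then (gaps ++ [c], (0:Int)) else (gaps, c)) = (gaps, c) := by simp [hb, hc]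
        rw [hf, ih gaps c]
        simp [pvG, hb, hc]

theorem pvPairsB (s : List Int) : ∀ (n p : Int), p ≤ n - 1 →
    pvPairs (p :: ((PySem.List.enumerate s n).filter (fun q => q.2 != 0)).map (fun q => q.1))
      = pvG (n - p - 1) s := by
  induction s with
  | nil => intro n p _; simp [pvPairs, pvG, PySem.List.enumerate]
  | cons bit t ih =>
    intro n p hp
    rw [PySem.List.enumerate_cons, List.filter_cons]
    by_cases hb : bit = 0
    · have hbne : ((n, bit).2 != 0) = false := by simp [hb]
      rw [if_neg (by simp [hbne])]
      have h1 : p ≤ (n + 1) - 1 := by omega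
      have hIH := ih (n + 1) p h1
      have harg : n + 1 - p - 1 = n - p - 1 + 1 := by omega
      rw [harg] at hIH
      rw [hIH]
      simp [pvG, hb]
    · have hbne : ((n, bit).2 != 0) = true := by simp [hb]
      rw [if_pos hbne, List.map_cons]
      have h1 : n ≤ (n + 1) - 1 := by omega
      have hIH := ih (n + 1) n h1
      have harg : n + 1 - n - 1 = (0:Int) := by omega
      rw [harg] at hIH
      have hstep : pvPairs (p :: n ::
          ((PySem.List.enumerate t (n+1)).filter (fun q => q.2 != 0)).map (fun q => q.1))
          = (if n - p - 1 > 0 then [n - p - 1] else []) ++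
            pvPairs (n :: ((PySem.List.enumerate t (n+1)).filter (fun q => q.2 != 0)).map (fun q => q.1)) := by
        by_cases hc : (1:Int) < n - p
        · simp [pvPairs, List.zip, hc]
        · simp [pvPairs, List.zip, hc]
      rw [hstep, hIH]
      by_cases hc : (1:Int) < n - p
      · simp [pvG, hb, hc]
      · have hz : n - p - 1 = 0 := by omega
        simp [pvG, hb, hz]

-- ===== VERDICT (by name: the statement is the Claim_ definition above) =====
theorem calculate_gap_structure_spec : Claim_equal_calculate_gap_structure := by
  intro s _
  show calculate_gap_structure s = calculate_gap_structure_alt s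
  have hA : calculate_gap_structure s = pvG 0 s := by
    unfold calculate_gap_structure
    simpa using pvFoldA s [] 0
  have hB : calculate_gap_structure_alt s = pvG 0 s := by
    unfold calculate_gap_structure_alt
    have := pvPairsB s 0 (-1) (by omega)
    simpa [pvPairs] using this
  rw [hA, hB]
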